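-- pv_equiv track=rewrite | github.com/kodsnack/advent_of_code_2018 | sgenheden-python/day7/part1.py | find_start
-- ===== SOURCE A (Python) =====
-- def find_start(nodes, edges, traversed):
--     candidates = []
--     for node in nodes:
--         if node in traversed:
--             continue
--         last = False
--         for edge in edges:
--             if edge[1] == node and edge[0] not in traversed:
--                 last = True
--                 break
--         if not last:
--             candidates.append(node)
--     candidates.sort()
--     traversed.append(candidates[0])
--     return traversed[-1]
-- ===== SOURCE B (Python) =====
-- def find_start(nodes, edges, traversed):
--     trav = set(traversed)
--     blocked = {dst for src, dst in edges if src not in trav}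
--     best = None
--     for node in nodes:
--         if node in trav or node in blocked:
--             continue
--         if best is None or node < best:
--             best = node
--     traversed.append(best)
--     return best
-- ===== Notes on version B (the rewrite author's own statement) =====
-- stated objective: faster
-- what changed: Replaces the per-node scan over all edges plus a sort with one pass building a blocked-target set and a single running-minimum pass over the nodes.
-- outside the precondition, e.g. on find_start(['A'], [], ['A']): A raises IndexError, B returns None
import Mathlib
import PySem

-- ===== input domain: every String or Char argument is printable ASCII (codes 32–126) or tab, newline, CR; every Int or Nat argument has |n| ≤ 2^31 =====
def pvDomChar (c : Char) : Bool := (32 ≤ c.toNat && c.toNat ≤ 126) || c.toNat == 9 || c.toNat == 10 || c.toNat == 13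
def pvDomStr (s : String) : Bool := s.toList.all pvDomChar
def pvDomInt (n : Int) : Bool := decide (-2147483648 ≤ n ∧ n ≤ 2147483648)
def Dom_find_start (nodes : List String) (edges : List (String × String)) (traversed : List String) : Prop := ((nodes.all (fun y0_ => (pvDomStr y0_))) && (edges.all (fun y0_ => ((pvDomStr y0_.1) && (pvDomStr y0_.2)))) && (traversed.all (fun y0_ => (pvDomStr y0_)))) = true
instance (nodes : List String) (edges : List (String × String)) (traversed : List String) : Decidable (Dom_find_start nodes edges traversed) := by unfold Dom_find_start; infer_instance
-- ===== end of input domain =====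

-- B replaces A's per-node scan of all edges plus a sort by one blocked-target set and a single
-- running-minimum pass (objective: faster). Both A and B append the result to `traversed`
-- (same mutation); the theorems below are about the RETURN value.

-- ===== PORT A =====
def find_start (nodes : List String) (edges : List (String × String)) (traversed : List String) : String :=
  let candidates := nodes.foldl (fun acc node =>
    if traversed.contains node then acc
    else
      let last := edges.any (fun e => e.2 == node && !(traversed.contains e.1))
      if last then acc else acc ++ [node]) []
  let candidates := PySem.List.sorted candidates (fun x => x) false
  (PySem.List.pyGet? candidates 0).getD ""   -- candidates[0]; Pre_ excludes the empty case (IndexError)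

-- ===== PORT B =====
def find_start_alt (nodes : List String) (edges : List (String × String)) (traversed : List String) : String :=
  let trav : PySem.Set String := PySem.Set.ofList traversed
  let blocked : PySem.Set String :=
    PySem.Set.ofList ((edges.filter (fun e => !(trav.contains e.1))).map Prod.snd)
  let best := nodes.foldl (fun acc node =>
    if trav.contains node || blocked.contains node then acc
    else match acc with
      | none => some node
      | some b => some (if node < b then node else b)) (none : Option String)
  best.getD ""   -- Pre_ excludes the no-candidate case (Source B returns None there, A raises)

-- ===== PRECONDITION & SPEC =====
-- Pre_ excludes exactly the inputs with no available candidate, on which A raises IndexError.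
def Pre_find_start (nodes : List String) (edges : List (String × String)) (traversed : List String) : Prop :=
  ∃ node ∈ nodes, node ∉ traversed ∧ ∀ e ∈ edges, ¬(e.2 = node ∧ e.1 ∉ traversed)
instance (nodes : List String) (edges : List (String × String)) (traversed : List String) : Decidable (Pre_find_start nodes edges traversed) := by unfold Pre_find_start; infer_instance

def pvWitness_find_start : List String × (List (String × String)) × List String :=
  (["B", "A", "C"], [("A", "C"), ("C", "B")], ["A"])

def Spec_find_start (nodes : List String) (edges : List (String × String)) (traversed : List String) (out : String) : Prop := out = find_start_alt nodes edges traversed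
instance (nodes : List String) (edges : List (String × String)) (traversed : List String) (out : String) : Decidable (Spec_find_start nodes edges traversed out) := by unfold Spec_find_start; infer_instance

-- ===== CLAIM (what is proved, stated in full; the proofs are below) =====
def Claim_equal_find_start : Prop := ∀ (nodes : List String) (edges : List (String × String)) (traversed : List String), Dom_find_start nodes edges traversed → Pre_find_start nodes edges traversed → Spec_find_start nodes edges traversed (find_start nodes edges traversed)

-- ===== LEMMAS AND PROOFS =====

theorem pv_candA (traversed : List String) (edges : List (String × String))
    (nodes : List String) (acc : List String) :
    nodes.foldl (fun acc node =>
      if traversed.contains node then acc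
      else
        let last := edges.any (fun e => e.2 == node && !(traversed.contains e.1))
        if last then acc else acc ++ [node]) acc
    = acc ++ nodes.filter (fun node =>
        !(traversed.contains node) && !(edges.any (fun e => e.2 == node && !(traversed.contains e.1)))) := by
  have hfun : (fun (acc : List String) (node : String) =>
      if traversed.contains node then acc
      else
        let last := edges.any (fun e => e.2 == node && !(traversed.contains e.1))
        if last then acc else acc ++ [node])
    = (fun (acc : List String) (node : String) =>
      if (!(traversed.contains node) && !(edges.any (fun e => e.2 == node && !(traversed.contains e.1)))) = true
      then acc ++ [node] else acc) := by
    funext acc node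
    by_cases h1 : node ∈ traversed
    · simp [h1]
    · by_cases h2 : ∃ e ∈ edges, e.2 = node ∧ e.1 ∉ traversed
      · simp [h1, h2]
        obtain ⟨⟨a, b⟩, he, rfl, ha⟩ := h2
        exact ⟨a, he, ha⟩
      · simp [h1, h2]
        intro a ha
        by_contra hna
        exact h2 ⟨(a, node), ha, rfl, hna⟩
  rw [hfun, PySem.List.foldl_append_if_eq_filter]

theorem pv_foldB {α : Type} (p : α → Bool) (f : Option α → α → Option α) :
    ∀ (l : List α) (acc : Option α),
      l.foldl (fun acc x => if p x then acc else f acc x) acc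
      = (l.filter (fun x => !(p x))).foldl f acc := by
  intro l
  induction l with
  | nil => intro acc; simp
  | cons n t ih =>
    intro acc
    by_cases h : p n
    · simp [h, ih]
    · simp [h, ih]

theorem pv_minfold : ∀ (cs : List String) (b : String),
    cs.foldl (fun acc node => match acc with
      | none => some node
      | some b => some (if node < b then node else b)) (some b)
    = some (cs.foldl (fun b node => if node < b then node else b) b) := by
  intro cs
  induction cs with
  | nil => intro b; simp
  | cons c t ih =>
    intro b
    simp only [List.foldl_cons]
    exact ih _

theorem pv_min_eq (b x : String) : (if x < b then x else b) = min b x := by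
  by_cases h : x < b
  · rw [if_pos h, min_eq_right h.le]
  · rw [if_neg h, min_eq_left (not_lt.mp h)]

-- head of the stable sort = Python min of a nonempty list
theorem pv_sorted_head_eq_min (c : String) (t : List String) :
    (PySem.List.pyGet? (PySem.List.sorted (c :: t) (fun x => x) false) 0).getD ""
    = t.foldl (fun b node => if node < b then node else b) c := by
  have hne : PySem.List.sorted (c :: t) (fun x => x) false ≠ [] := by
    intro h
    rw [PySem.List.sorted_eq_nil_iff] at h
    simp at h
  obtain ⟨m, t', hs⟩ := List.exists_cons_of_ne_nil hne
  have hmin : PySem.List.min? (c :: t) (fun x => x) = some (t.foldl min c) :=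
    PySem.List.min?_id_cons c t
  have hmem_m : m ∈ (c :: t) := by
    rw [← PySem.List.mem_sorted (c :: t) (fun x => x) false, hs]; simp
  have hmem_v : t.foldl min c ∈ (c :: t) := PySem.List.min?_mem hmin
  have h1 : m ≤ t.foldl min c := PySem.List.key_head_sorted_le (c :: t) (fun x => x) hs _ hmem_v
  have h2 : t.foldl min c ≤ m := PySem.List.min?_isMin hmin _ hmem_m
  have hfold : t.foldl (fun b node => if node < b then node else b) c = t.foldl min c := by
    congr 1; funext b x; exact pv_min_eq b x
  rw [hs, hfold, ← le_antisymm h1 h2]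
  simp [PySem.List.pyGet?, PySem.List.pyIdx?]

theorem pv_pred_eq (traversed : List String) (edges : List (String × String)) (node : String) :
    ((PySem.Set.ofList traversed).contains node
      || (PySem.Set.ofList ((edges.filter (fun e => !((PySem.Set.ofList traversed).contains e.1))).map Prod.snd)).contains node)
    = !(!(traversed.contains node) && !(edges.any (fun e => e.2 == node && !(traversed.contains e.1)))) := by
  have hmem : ∀ (x : String) (l : List String),
      (PySem.Set.ofList l).contains x = l.contains x := by
    intro x l
    rcases Bool.eq_false_or_eq_true (l.contains x) with h | h <;>
      simp_all [PySem.Set.mem_ofList]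
  rw [hmem]
  by_cases hn : node ∈ traversed
  · simp [hn]
  · simp only [List.contains_eq_mem, hn, decide_false, Bool.false_or, Bool.not_false,
      Bool.true_and, Bool.not_not]
    rw [Bool.eq_iff_iff]
    simp only [List.contains_eq_mem, List.mem_map, List.mem_filter,
      List.any_eq_true, decide_eq_true_eq, Bool.and_eq_true, beq_iff_eq, Bool.not_eq_true',
      hmem, decide_eq_false_iff_not]
    constructor
    · rintro ⟨e, ⟨he, h1⟩, h2⟩
      exact ⟨e, he, h2, by simpa using h1⟩
    · rintro ⟨e, he, h2, h1⟩
      exact ⟨e, ⟨he, by simpa using h1⟩, h2⟩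

theorem pv_equal : ∀ (nodes : List String) (edges : List (String × String)) (traversed : List String),
    find_start nodes edges traversed = find_start_alt nodes edges traversed := by
  intro nodes edges traversed
  simp only [find_start, find_start_alt]
  rw [pv_candA, List.nil_append]
  rw [pv_foldB (fun node =>
      (PySem.Set.ofList traversed).contains node
        || (PySem.Set.ofList ((edges.filter (fun e => !((PySem.Set.ofList traversed).contains e.1))).map Prod.snd)).contains node)
    (fun acc node => match acc with
      | none => some node
      | some b => some (if node < b then node else b)) nodes none]
  have hfilter : nodes.filter (fun node =>
      !((PySem.Set.ofList traversed).contains node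
        || (PySem.Set.ofList ((edges.filter (fun e => !((PySem.Set.ofList traversed).contains e.1))).map Prod.snd)).contains node))
    = nodes.filter (fun node =>
        !(traversed.contains node) && !(edges.any (fun e => e.2 == node && !(traversed.contains e.1)))) := by
    apply List.filter_congr
    intro x _
    rw [pv_pred_eq]
    simp
  rw [hfilter]
  generalize (nodes.filter (fun node =>
      !(traversed.contains node) && !(edges.any (fun e => e.2 == node && !(traversed.contains e.1))))) = cs
  cases cs with
  | nil => simp [PySem.List.sorted, PySem.List.pyGet?]
  | cons c t =>
    rw [pv_sorted_head_eq_min c t]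
    simp only [List.foldl_cons]
    rw [pv_minfold]
    rfl

-- ===== VERDICT (by name: the statement is the Claim_ definition above) =====
theorem find_start_spec : Claim_equal_find_start := by
  intro nodes edges traversed _ _
  unfold Spec_find_start
  exact pv_equal nodes edges traversed
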